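-- pv_equiv track=rewrite | github.com/freshman2312/Texas-holdem-solver | script/eval_slumbot_20b_raise.py | parse_action_simplified
-- ===== SOURCE A (Python) =====
-- def parse_action_simplified(action):
--     """
--     Parse an action string into a simplified format.
--     - Split action by '/' to separate streets
--     - For bets ('b'):
--       - If it's the first bet in its street and amount > 300, replace with 'r'
--       - If it's not first bet and amount > 3x previous bet, replace with 'r'
--     - Remove all numbers from the result
--
--     Args:
--         action (str): Original action string with bet amounts (e.g., "b200c/kb400")
--
--     Returns:
--         str: Simplified action string with 'b' or 'r' and no numbers
--     """
--     if not action: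
--         return ""
--
--     # Split by '/' to process each street separately
--     streets = action.split('/')
--     simplified_streets = []
--
--     for street in streets:
--         # Extract bet actions and amounts
--         i = 0
--         simplified_street = ""
--         prev_bet_amount = 100  # Start with big blind as reference
--
--         while i < len(street):
--             if street[i] == 'b':
--                 # Extract bet amount
--                 i += 1
--                 amount_start = i
--                 while i < len(street) and street[i].isdigit():
--                     i += 1
--
--                 if amount_start < i:  # We found digits after 'b'
--                     bet_amount = int(street[amount_start:i])
--
--                     # Check if this is the first bet on this street
--                     is_first_bet = 'b' not in simplified_street
--
--                     # Determine if this is a raise ('r') or bet ('b')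
--                     if is_first_bet and bet_amount > 300:
--                         simplified_street += 'r'
--                     elif not is_first_bet and bet_amount > 3 * prev_bet_amount:
--                         simplified_street += 'r'
--                     else:
--                         simplified_street += 'b'
--
--                     prev_bet_amount = bet_amount
--                 else:
--                     simplified_street += 'b'  # Just a 'b' with no amount
--             else:
--                 simplified_street += street[i]
--                 i += 1
--
--         simplified_streets.append(simplified_street)
--
--     # Join streets back with '/'
--     return '/'.join(simplified_streets)
-- ===== SOURCE B (Python) =====
-- def parse_action_simplified(action):
--     """
--     Simplify an action string: per street (separated by '/'), each bet 'b<amount>'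
--     becomes 'r' if the amount is more than 3x the previous bet amount of the street
--     (starting reference 100, so a first bet over 300 is a raise), else 'b'; the
--     digits are dropped, everything else is kept verbatim.
--     """
--     DIGITS = '0123456789'
--
--     def street_simplify(street):
--         parts = street.split('b')
--         pieces = [parts[0]]
--         prev = 100
--         for part in parts[1:]:
--             rest = part.lstrip(DIGITS)
--             k = len(part) - len(rest)
--             if k == 0:
--                 pieces.append('b' + part)  # bare 'b' with no amount
--             else:
--                 amt = int(part[:k])
--                 pieces.append(('r' if amt > 3 * prev else 'b') + rest)
--                 prev = amt
--         return ''.join(pieces)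
--
--     return '/'.join(street_simplify(s) for s in action.split('/'))
-- ===== Notes on version B (the rewrite author's own statement) =====
-- stated objective: simpler
-- what changed: B replaces A's index-driven character scan with per-street state by splitting each street on 'b' and classifying each fragment's leading digit run against a single 3x-previous-bet threshold (start reference 100), dropping A's separate first-bet branch and its 'b'-in-output-so-far test.
-- intended difference: On streets whose opening bets are all raises (every amount > 300, no bare 'b' before) followed by a bet with amount in (300, 3x previous], A still marks that bet 'r' because its first-bet test looks for a 'b' character in the output built so far (a raise leaves none), while B marks it 'b'; B follows the documented rule 'raise only if amount > 3x the previous bet', e.g. A('b400b500')='rr' but B gives 'rb'. — e.g. on parse_action_simplified("b400b500"): A returns "rr", B returns "rb"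
import Mathlib
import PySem

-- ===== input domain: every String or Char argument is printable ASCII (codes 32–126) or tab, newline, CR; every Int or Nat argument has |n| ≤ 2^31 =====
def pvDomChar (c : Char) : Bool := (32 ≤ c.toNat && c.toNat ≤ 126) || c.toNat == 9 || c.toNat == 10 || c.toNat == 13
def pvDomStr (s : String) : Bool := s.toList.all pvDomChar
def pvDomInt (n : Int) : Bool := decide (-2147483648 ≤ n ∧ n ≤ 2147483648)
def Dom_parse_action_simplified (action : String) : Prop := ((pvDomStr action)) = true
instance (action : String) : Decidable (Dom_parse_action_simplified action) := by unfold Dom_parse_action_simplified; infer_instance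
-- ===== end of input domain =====

-- B simplifies A's hand-rolled indexed scan (with its output-membership "first bet" test) into a
-- split-on-'b' pass with a single 3x-previous-bet threshold; on streets opening with raises A's
-- first-bet proxy misfires (see D_ below), where B follows the documented rule.

-- ===== PORT A =====
-- inner while: consume the maximal digit run after a 'b' (returns the digits and the remainder)
def aDigits : List Char → List Char × List Char
  | [] => ([], [])
  | c :: cs =>
    if PySem.Chars.isdigit c then
      let p := aDigits cs
      (c :: p.1, p.2)
    else ([], c :: cs)

-- outer while over one street; state = (simplified_street, prev_bet_amount); the Nat argument is
-- fuel (started at the street length, one unit per loop iteration) — a totality guard only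
def aLoop : Nat → List Char → List Char → Int → List Char
  | _, [], simplified, _ => simplified
  | 0, _ :: _, simplified, _ => simplified  -- never reached: each iteration consumes ≥ 1 char
  | fuel + 1, c :: rest, simplified, prev =>
    if c = 'b' then
      let p := aDigits rest
      if p.1 ≠ [] then  -- we found digits after 'b'
        let amt := (PySem.Int.ofChars? p.1).getD 0  -- int() on a nonempty digit run never fails
        let isFirst := 'b' ∉ simplified
        if isFirst ∧ amt > 300 then aLoop fuel p.2 (simplified ++ ['r']) amt
        else if ¬ isFirst ∧ amt > 3 * prev then aLoop fuel p.2 (simplified ++ ['r']) amt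
        else aLoop fuel p.2 (simplified ++ ['b']) amt
      else aLoop fuel rest (simplified ++ ['b']) prev  -- just a 'b' with no amount
    else aLoop fuel rest (simplified ++ [c]) prev

def parse_action_simplified (action : String) : String :=
  if action = "" then ""
  else
    let streets := PySem.Chars.splitOn action.toList ['/']  -- action.split('/')
    let simplified := streets.map (fun street => aLoop street.length street [] 100)
    String.ofList (PySem.Chars.join ['/'] simplified)  -- '/'.join(...)

-- ===== PORT B =====
def bDigitList : List Char := ['0', '1', '2', '3', '4', '5', '6', '7', '8', '9']  -- DIGITS

-- loop body: classify one fragment that followed a 'b'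
def bStep (st : List (List Char) × Int) (part : List Char) : List (List Char) × Int :=
  let rest := part.dropWhile (fun c => c ∈ bDigitList)  -- part.lstrip(DIGITS): exact (drops the leading run of DIGITS chars)
  let k := part.length - rest.length
  if k = 0 then (st.1 ++ ['b' :: part], st.2)  -- bare 'b' with no amount
  else
    let amt := (PySem.Int.ofChars? (part.take k)).getD 0  -- int(part[:k]) on k > 0 digits never fails
    (st.1 ++ [(if amt > 3 * st.2 then 'r' else 'b') :: rest], amt)

def bStreet (street : List Char) : List Char :=
  match PySem.Chars.splitOn street ['b'] with  -- street.split('b')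
  | [] => []  -- unreachable: str.split never returns an empty list
  | p0 :: parts => PySem.Chars.join [] ((parts.foldl bStep ([p0], 100)).1)  -- ''.join(pieces)

def parse_action_simplified_alt (action : String) : String :=
  String.ofList (PySem.Chars.join ['/'] ((PySem.Chars.splitOn action.toList ['/']).map bStreet))

-- ===== PRECONDITION & SPEC =====
-- change region: walk the street's fragments after each 'b'; prev starts at the 100 reference,
-- each bet amount a > 3*prev continues the opening raise run, and a wrong mark happens exactly
-- when a run bet then has 300 < a ≤ 3*prev (a bare 'b' or a small first bet ends the run harmlessly)
def dBadParts : Int → List (List Char) → Bool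
  | _, [] => false
  | prev, p :: ps =>
    let ds := p.takeWhile PySem.Chars.isdigit
    if ds = [] then false
    else
      let a := (PySem.Int.ofChars? ds).getD 0
      if a > 3 * prev then dBadParts a ps else decide (300 < a)

-- On streets whose opening bets are all raises (every amount > 300, no bare 'b' before) followed by
-- a bet with amount in (300, 3x previous], A still marks that bet 'r' (its first-bet test looks for a
-- 'b' character in the output built so far, and a raise leaves none) while B marks it 'b'; B follows
-- the documented rule "raise only if amount > 3x the previous bet".
def D_parse_action_simplified (action : String) : Prop :=
  ∃ s ∈ PySem.Chars.splitOn action.toList ['/'], dBadParts 100 (PySem.Chars.splitOn s ['b']).tail = true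
instance (action : String) : Decidable (D_parse_action_simplified action) := by
  unfold D_parse_action_simplified; infer_instance

def Spec_parse_action_simplified (action : String) (out : String) : Prop :=
  ¬ D_parse_action_simplified action → out = parse_action_simplified_alt action
instance (action : String) (out : String) : Decidable (Spec_parse_action_simplified action out) := by
  unfold Spec_parse_action_simplified; infer_instance

def pvDiffWitness_parse_action_simplified : String := "b400b500"
def pvDiffWitnessOut_parse_action_simplified : String × String := ("rr", "rb")

-- ===== CLAIM (what is proved, stated in full; the proofs are below) =====
def Claim_unchanged_parse_action_simplified : Prop := ∀ (action : String), Dom_parse_action_simplified action → Spec_parse_action_simplified action (parse_action_simplified action)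
def Claim_changed_parse_action_simplified : Prop := Dom_parse_action_simplified (pvDiffWitness_parse_action_simplified) ∧ D_parse_action_simplified (pvDiffWitness_parse_action_simplified) ∧ parse_action_simplified (pvDiffWitness_parse_action_simplified) = pvDiffWitnessOut_parse_action_simplified.1 ∧ parse_action_simplified_alt (pvDiffWitness_parse_action_simplified) = pvDiffWitnessOut_parse_action_simplified.2 ∧ pvDiffWitnessOut_parse_action_simplified.1 ≠ pvDiffWitnessOut_parse_action_simplified.2
def Claim_exact_parse_action_simplified : Prop := ∀ (action : String), Dom_parse_action_simplified action → D_parse_action_simplified action → parse_action_simplified action ≠ parse_action_simplified_alt action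

-- ===== LEMMAS AND PROOFS =====
-- proof-side token view of a street (fuel = street length, totality guard)
def betToks : Nat → List Char → List (Option Int)
  | _, [] => []
  | 0, _ :: _ => []  -- never reached
  | fuel + 1, c :: r =>
    if c = 'b' then
      let ds := r.takeWhile PySem.Chars.isdigit
      if ds = [] then none :: betToks fuel r
      else some ((PySem.Int.ofChars? ds).getD 0) :: betToks fuel (r.dropWhile PySem.Chars.isdigit)
    else betToks fuel r

def badTok : Int → List (Option Int) → Bool
  | _, [] => false
  | _, none :: _ => false
  | prev, some a :: t => if a > 3 * prev then badTok a t else decide (300 < a)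


-- membership in DIGITS is Python's isdigit on chars
lemma digitPred_eq : (fun c => decide (c ∈ bDigitList)) = PySem.Chars.isdigit := by
  funext c
  simp only [PySem.Chars.isdigit, bDigitList]
  have htn : ∀ d : Char, (c.toNat = d.toNat) → c = d := fun d h => Char.ext (UInt32.toNat_inj.mp h)
  by_cases h : ('0' : Char) ≤ c ∧ c ≤ '9'
  · obtain ⟨h1, h2⟩ := h
    rw [Char.le_def, UInt32.le_iff_toNat_le] at h1 h2
    change (48 : UInt32).toNat ≤ _ at h1
    change _ ≤ (57 : UInt32).toNat at h2
    rw [show (48 : UInt32).toNat = 48 from rfl] at h1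
    rw [show (57 : UInt32).toNat = 57 from rfl] at h2
    have hc : c = '0' ∨ c = '1' ∨ c = '2' ∨ c = '3' ∨ c = '4' ∨ c = '5' ∨ c = '6' ∨ c = '7' ∨ c = '8' ∨ c = '9' := by
      have hv : c.toNat = 48 ∨ c.toNat = 49 ∨ c.toNat = 50 ∨ c.toNat = 51 ∨ c.toNat = 52 ∨ c.toNat = 53 ∨ c.toNat = 54 ∨ c.toNat = 55 ∨ c.toNat = 56 ∨ c.toNat = 57 := by
        unfold Char.toNat at *; omega
      rcases hv with h | h | h | h | h | h | h | h | h | h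
      · exact Or.inl (htn _ h)
      · exact Or.inr (Or.inl (htn _ h))
      · exact Or.inr (Or.inr (Or.inl (htn _ h)))
      · exact Or.inr (Or.inr (Or.inr (Or.inl (htn _ h))))
      · exact Or.inr (Or.inr (Or.inr (Or.inr (Or.inl (htn _ h)))))
      · exact Or.inr (Or.inr (Or.inr (Or.inr (Or.inr (Or.inl (htn _ h))))))
      · exact Or.inr (Or.inr (Or.inr (Or.inr (Or.inr (Or.inr (Or.inl (htn _ h)))))))
      · exact Or.inr (Or.inr (Or.inr (Or.inr (Or.inr (Or.inr (Or.inr (Or.inl (htn _ h))))))))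
      · exact Or.inr (Or.inr (Or.inr (Or.inr (Or.inr (Or.inr (Or.inr (Or.inr (Or.inl (htn _ h)))))))))
      · exact Or.inr (Or.inr (Or.inr (Or.inr (Or.inr (Or.inr (Or.inr (Or.inr (Or.inr (htn _ h)))))))))
    rcases hc with rfl | rfl | rfl | rfl | rfl | rfl | rfl | rfl | rfl | rfl <;> decide
  · have hmem : c ∉ (['0', '1', '2', '3', '4', '5', '6', '7', '8', '9'] : List Char) := by
      intro hm; apply h; fin_cases hm <;> exact ⟨by decide, by decide⟩
    simp [hmem]
    cases hd1 : decide (('0' : Char) ≤ c) <;> cases hd2 : decide (c ≤ '9') <;> simp_all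

-- A's inner while is takeWhile/dropWhile on isdigit
lemma aDigits_eq (cs : List Char) :
    aDigits cs = (cs.takeWhile PySem.Chars.isdigit, cs.dropWhile PySem.Chars.isdigit) := by
  induction cs with
  | nil => rfl
  | cons c cs ih =>
    simp only [aDigits, List.takeWhile_cons, List.dropWhile_cons]
    split <;> simp_all

-- ---------- split('b') as a structural recursion ----------
def splitB (sep : Char) : List Char → List (List Char)
  | [] => [[]]
  | c :: r => if c = sep then [] :: splitB sep r
              else match splitB sep r with
                   | [] => [[c]]
                   | p :: ps => (c :: p) :: ps

lemma splitB_ne_nil (sep : Char) (l : List Char) : splitB sep l ≠ [] := by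
  cases l with
  | nil => simp [splitB]
  | cons c r =>
    simp only [splitB]
    split
    · simp
    · split <;> simp

lemma splitOn_go_eq (sep : Char) : ∀ fuel l cur acc, l.length ≤ fuel →
    PySem.Chars.splitOn.go [sep] fuel l cur acc =
      acc.reverse ++ List.modifyHead (cur.reverse ++ ·) (splitB sep l) := by
  intro fuel
  induction fuel with
  | zero =>
    intro l cur acc h
    have : l = [] := by cases l <;> simp_all
    subst this
    simp [PySem.Chars.splitOn.go, splitB]
  | succ fuel ih =>
    intro l cur acc h
    cases l with
    | nil => simp [PySem.Chars.splitOn.go, splitB]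
    | cons c rest =>
      simp only [PySem.Chars.splitOn.go]
      by_cases hc : c = sep
      · subst hc
        have hpre : List.isPrefixOf [c] (c :: rest) = true := by simp [List.isPrefixOf]
        rw [if_pos hpre]
        rw [ih _ _ _ (by simpa using Nat.le_of_succ_le_succ h)]
        simp only [splitB, List.length_cons, List.length_nil, List.drop_succ_cons,
          List.drop_zero, List.reverse_cons, List.append_assoc, List.singleton_append,
          List.nil_append, List.reverse_nil]
        cases hs : splitB c rest with
        | nil => exact absurd hs (splitB_ne_nil c rest)
        | cons p ps => simp
      · have hpre : List.isPrefixOf [sep] (c :: rest) = false := by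
          simp [List.isPrefixOf]
          intro he; exact absurd he.symm hc
        rw [if_neg (by simp [hpre])]
        rw [ih _ _ _ (by simpa using Nat.le_of_succ_le_succ h)]
        simp only [splitB, if_neg hc]
        cases hs : splitB sep rest with
        | nil => exact absurd hs (splitB_ne_nil sep rest)
        | cons p ps => simp

lemma splitOn_eq_splitB (sep : Char) (l : List Char) :
    PySem.Chars.splitOn l [sep] = splitB sep l := by
  unfold PySem.Chars.splitOn
  rw [splitOn_go_eq sep _ _ _ _ (Nat.le_succ _)]
  cases hs : splitB sep l with
  | nil => exact absurd hs (splitB_ne_nil sep l)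
  | cons p ps => simp

lemma join_nil_eq_flatten (ps : List (List Char)) : PySem.Chars.join [] ps = ps.flatten := by
  induction ps with
  | nil => simp [PySem.Chars.join_nil]
  | cons p ps ih =>
    cases ps with
    | nil => simp [PySem.Chars.join_singleton]
    | cons q rest => rw [PySem.Chars.join_cons_cons]; simp at ih ⊢; rw [ih]

lemma take_sub_dropWhile (p : Char → Bool) (l : List Char) :
    l.take (l.length - (l.dropWhile p).length) = l.takeWhile p := by
  induction l with
  | nil => rfl
  | cons c l ih =>
    by_cases h : p c
    · simp [h]
      rw [Nat.succ_sub (List.length_dropWhile_le p l)]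
      simp [h, ih]
    · simp [h, List.takeWhile_cons]

-- ---------- reference recursions for both sides ----------
-- A, after the accumulator is abstracted into the Boolean "a 'b' was emitted already"
def aRec : Nat → List Char → Bool → Int → List Char
  | _, [], _, _ => []
  | 0, _ :: _, _, _ => []
  | fuel + 1, c :: r, seen, prev =>
    if c = 'b' then
      let ds := r.takeWhile PySem.Chars.isdigit
      if ds = [] then 'b' :: aRec fuel r true prev
      else
        let amt := (PySem.Int.ofChars? ds).getD 0
        let out : Char := if (seen = false ∧ amt > 300) ∨ (seen = true ∧ amt > 3 * prev) then 'r' else 'b'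
        out :: aRec fuel (r.dropWhile PySem.Chars.isdigit) (seen || decide (out = 'b')) amt
    else c :: aRec fuel r seen prev

-- B, as a direct scan
def bRec : Nat → List Char → Int → List Char
  | _, [], _ => []
  | 0, _ :: _, _ => []
  | fuel + 1, c :: r, prev =>
    if c = 'b' then
      let ds := r.takeWhile PySem.Chars.isdigit
      if ds = [] then 'b' :: bRec fuel r prev
      else (if (PySem.Int.ofChars? ds).getD 0 > 3 * prev then 'r' else 'b') ::
        bRec fuel (r.dropWhile PySem.Chars.isdigit) ((PySem.Int.ofChars? ds).getD 0)
    else c :: bRec fuel r prev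

lemma aLoop_eq : ∀ (fuel : Nat) (s : List Char), s.length ≤ fuel → ∀ (acc : List Char) (prev : Int),
    aLoop fuel s acc prev = acc ++ aRec fuel s (decide ('b' ∈ acc)) prev := by
  intro fuel
  induction fuel with
  | zero =>
    intro s h acc prev
    have : s = [] := by cases s <;> simp_all
    subst this; simp [aLoop, aRec]
  | succ fuel ih =>
    intro s h acc prev
    cases s with
    | nil => simp [aLoop, aRec]
    | cons c rest =>
      have hr : rest.length ≤ fuel := by simpa using Nat.le_of_succ_le_succ h
      have hdw : (rest.dropWhile PySem.Chars.isdigit).length ≤ fuel :=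
        le_trans (List.length_dropWhile_le _ _) hr
      simp only [aLoop, aRec, aDigits_eq]
      by_cases hb : c = 'b'
      · rw [if_pos hb, if_pos hb]
        by_cases hds : rest.takeWhile PySem.Chars.isdigit = []
        · simp only [hds, ne_eq, not_true_eq_false, if_false, if_true, ite_false, ite_true]
          rw [ih rest hr (acc ++ ['b']) prev]
          simp
        · simp only [ne_eq, hds, not_false_eq_true, if_pos, ite_true]
          by_cases hmem : 'b' ∈ acc
          · have hseen : decide ('b' ∈ acc) = true := by simpa using hmem
            rw [if_neg (by simp [hmem] : ¬ ('b' ∉ acc ∧ (PySem.Int.ofChars? (rest.takeWhile PySem.Chars.isdigit)).getD 0 > 300))]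
            by_cases hgt : (PySem.Int.ofChars? (rest.takeWhile PySem.Chars.isdigit)).getD 0 > 3 * prev
            · rw [if_pos ⟨by simpa using hmem, hgt⟩]
              rw [ih _ hdw (acc ++ ['r']) _]
              simp [hseen, hgt, hmem]
            · rw [if_neg (by simp [hgt])]
              rw [ih _ hdw (acc ++ ['b']) _]
              simp [hseen, hgt, hmem]
          · have hseen : decide ('b' ∈ acc) = false := by simpa using hmem
            by_cases h300 : (PySem.Int.ofChars? (rest.takeWhile PySem.Chars.isdigit)).getD 0 > 300
            · rw [if_pos ⟨hmem, h300⟩]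
              rw [ih _ hdw (acc ++ ['r']) _]
              simp [hseen, h300, hmem]
            · rw [if_neg (by simp [h300])]
              rw [if_neg (by simp [hmem])]
              rw [ih _ hdw (acc ++ ['b']) _]
              simp [hseen, h300, hmem]
      · rw [if_neg hb, if_neg hb]
        rw [ih rest hr (acc ++ [c]) prev]
        have hbc : (decide ('b' = c)) = false := by simpa using fun he => hb he.symm
        simp [hbc]

lemma bStep_fold_factor : ∀ (parts : List (List Char)) (ps : List (List Char)) (prev : Int),
    parts.foldl bStep (ps, prev) =
      (ps ++ (parts.foldl bStep ([], prev)).1, (parts.foldl bStep ([], prev)).2) := by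
  intro parts
  induction parts with
  | nil => intro ps prev; simp
  | cons part rest ih =>
    intro ps prev
    simp only [List.foldl_cons]
    rw [ih (bStep (ps, prev) part).1 (bStep (ps, prev) part).2,
        ih (bStep ([], prev) part).1 (bStep ([], prev) part).2]
    simp only [bStep]
    split
    · simp
    · simp

-- the head of split('b') carries exactly the digit prefix of the street
lemma splitB_digit : ∀ r : List Char, ∃ p0 parts, splitB 'b' r = p0 :: parts ∧
    r.takeWhile PySem.Chars.isdigit = p0.takeWhile PySem.Chars.isdigit ∧
    splitB 'b' (r.dropWhile PySem.Chars.isdigit) = (p0.dropWhile PySem.Chars.isdigit) :: parts := by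
  intro r
  induction r with
  | nil => exact ⟨[], [], by simp [splitB]⟩
  | cons c r ih =>
    obtain ⟨p0, parts, h1, h2, h3⟩ := ih
    by_cases hb : c = 'b'
    · subst hb
      refine ⟨[], splitB 'b' r, by simp [splitB],
        by simp [List.takeWhile_cons, show PySem.Chars.isdigit 'b' = false from by decide], ?_⟩
      rw [List.dropWhile_cons_of_neg (by decide)]
      simp [splitB]
    · by_cases hd : PySem.Chars.isdigit c
      · refine ⟨c :: p0, parts, ?_, ?_, ?_⟩
        · simp [splitB, hb, h1]
        · simp [List.takeWhile_cons, hd, h2]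
        · simp [List.dropWhile_cons, hd, h3]
      · refine ⟨c :: p0, parts, ?_, ?_, ?_⟩
        · simp [splitB, hb, h1]
        · simp [List.takeWhile_cons, hd]
        · simp [List.dropWhile_cons, hd, splitB, hb, h1]

def bGo (s : List Char) (prev : Int) : List Char :=
  match splitB 'b' s with
  | [] => []
  | p0 :: parts => PySem.Chars.join [] ((parts.foldl bStep ([p0], prev)).1)

lemma factor_join (parts : List (List Char)) (p0 : List Char) (prev : Int) :
    PySem.Chars.join [] ((parts.foldl bStep ([p0], prev)).1) =
      p0 ++ PySem.Chars.join [] ((parts.foldl bStep ([], prev)).1) := by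
  rw [bStep_fold_factor parts [p0] prev]
  dsimp only
  rw [join_nil_eq_flatten, join_nil_eq_flatten]
  simp

lemma bGo_eq_bRec : ∀ (fuel : Nat) (s : List Char), s.length ≤ fuel → ∀ prev : Int,
    bGo s prev = bRec fuel s prev ∧
    PySem.Chars.join [] (((splitB 'b' s).foldl bStep ([], prev)).1) = bRec (fuel + 1) ('b' :: s) prev := by
  intro fuel
  induction fuel with
  | zero =>
    intro s h prev
    have : s = [] := by cases s <;> simp_all
    subst this
    exact ⟨rfl, rfl⟩
  | succ fuel ih =>
    intro s h prev
    have h1 : ∀ t : List Char, t.length ≤ fuel + 1 → ∀ pv : Int, bGo t pv = bRec (fuel + 1) t pv := by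
      intro t ht pv
      cases t with
      | nil => rfl
      | cons c r =>
        have hr : r.length ≤ fuel := by simpa using Nat.le_of_succ_le_succ ht
        by_cases hb : c = 'b'
        · subst hb
          unfold bGo
          simp only [show splitB 'b' ('b' :: r) = [] :: splitB 'b' r from by simp [splitB]]
          rw [factor_join]
          simpa using (ih r hr pv).2
        · unfold bGo
          obtain ⟨p0, parts, hsp, _, _⟩ := splitB_digit r
          have hsc : splitB 'b' (c :: r) = (c :: p0) :: parts := by simp [splitB, hb, hsp]
          simp only [hsc]
          rw [factor_join]
          have hbg : bGo r pv = bRec fuel r pv := (ih r hr pv).1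
          unfold bGo at hbg
          simp only [hsp] at hbg
          rw [factor_join] at hbg
          simp only [bRec, if_neg hb]
          rw [← hbg]
          simp
    refine ⟨h1 s h prev, ?_⟩
    -- second conjunct: the street just after a 'b'
    obtain ⟨p0, parts, hsp, htw, hdp⟩ := splitB_digit s
    simp only [hsp, List.foldl_cons]
    simp only [bStep, digitPred_eq]
    by_cases hk : p0.length - (p0.dropWhile PySem.Chars.isdigit).length = 0
    · -- no digits after the 'b'
      have htw0 : p0.takeWhile PySem.Chars.isdigit = [] := by
        have := take_sub_dropWhile PySem.Chars.isdigit p0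
        rw [hk] at this
        simpa using this.symm
      have hds : s.takeWhile PySem.Chars.isdigit = [] := by rw [htw, htw0]
      simp only [if_pos hk]
      simp only [List.nil_append]
      rw [factor_join]
      simp only [bRec, if_pos rfl, hds, if_pos rfl]
      have hthis := h1 s h prev
      unfold bGo at hthis
      simp only [hsp] at hthis
      rw [factor_join] at hthis
      rw [← hthis]
      simp
    · -- a digit run follows: a real bet
      have hlen : (p0.takeWhile PySem.Chars.isdigit).length + (p0.dropWhile PySem.Chars.isdigit).length = p0.length := by
        have hx := congrArg List.length (List.takeWhile_append_dropWhile (p := PySem.Chars.isdigit) (l := p0))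
        rw [List.length_append] at hx
        exact hx
      have htwne : p0.takeWhile PySem.Chars.isdigit ≠ [] := by
        intro hnil
        rw [hnil] at hlen
        simp at hlen
        exact hk (by omega)
      have hdsne : s.takeWhile PySem.Chars.isdigit ≠ [] := by rw [htw]; exact htwne
      have htake : p0.take (p0.length - (p0.dropWhile PySem.Chars.isdigit).length) = s.takeWhile PySem.Chars.isdigit := by
        rw [take_sub_dropWhile, htw]
      simp only [if_neg hk, htake]
      simp only [List.nil_append]
      rw [factor_join]
      simp only [bRec, if_pos rfl, if_neg hdsne]
      have hslen : (s.takeWhile PySem.Chars.isdigit).length + (s.dropWhile PySem.Chars.isdigit).length = s.length := by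
        have hx := congrArg List.length (List.takeWhile_append_dropWhile (p := PySem.Chars.isdigit) (l := s))
        rw [List.length_append] at hx
        exact hx
      have hdwlen : (s.dropWhile PySem.Chars.isdigit).length ≤ fuel + 1 := by
        have : (s.takeWhile PySem.Chars.isdigit).length ≠ 0 := by simpa using hdsne
        omega
      have hthis := h1 (s.dropWhile PySem.Chars.isdigit) hdwlen ((PySem.Int.ofChars? (s.takeWhile PySem.Chars.isdigit)).getD 0)
      unfold bGo at hthis
      simp only [hdp] at hthis
      rw [factor_join] at hthis
      rw [← hthis]
      simp

lemma bStreet_eq_bRec (s : List Char) : bStreet s = bRec s.length s 100 := by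
  have h := (bGo_eq_bRec s.length s le_rfl 100).1
  unfold bStreet
  rw [splitOn_eq_splitB]
  unfold bGo at h
  exact h

-- synced: once a 'b' has been emitted, A's rule is B's rule
lemma sync_eq : ∀ (fuel : Nat) (s : List Char), s.length ≤ fuel → ∀ prev : Int,
    aRec fuel s true prev = bRec fuel s prev := by
  intro fuel
  induction fuel with
  | zero =>
    intro s h prev
    have : s = [] := by cases s <;> simp_all
    subst this; rfl
  | succ fuel ih =>
    intro s h prev
    cases s with
    | nil => rfl
    | cons c r =>
      have hr : r.length ≤ fuel := by simpa using Nat.le_of_succ_le_succ h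
      have hdw : (r.dropWhile PySem.Chars.isdigit).length ≤ fuel :=
        le_trans (List.length_dropWhile_le _ _) hr
      simp only [aRec, bRec]
      by_cases hb : c = 'b'
      · rw [if_pos hb, if_pos hb]
        by_cases hds : r.takeWhile PySem.Chars.isdigit = []
        · simp [hds, ih r hr prev]
        · simp only [hds, if_neg hds]
          by_cases hgt : (PySem.Int.ofChars? (r.takeWhile PySem.Chars.isdigit)).getD 0 > 3 * prev
          · simp [hgt, ih _ hdw]
          · simp [hgt, ih _ hdw]
      · simp [hb, ih r hr prev]

-- agreement while no wrong mark is flagged: prev = 100 or the amount of an opening raise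
lemma run_eq : ∀ (fuel : Nat) (s : List Char), s.length ≤ fuel → ∀ prev : Int, 100 ≤ prev →
    badTok prev (betToks fuel s) = false → aRec fuel s false prev = bRec fuel s prev := by
  intro fuel
  induction fuel with
  | zero =>
    intro s h prev _ _
    have : s = [] := by cases s <;> simp_all
    subst this; rfl
  | succ fuel ih =>
    intro s h prev hprev hbad
    cases s with
    | nil => rfl
    | cons c r =>
      have hr : r.length ≤ fuel := by simpa using Nat.le_of_succ_le_succ h
      have hdw : (r.dropWhile PySem.Chars.isdigit).length ≤ fuel :=
        le_trans (List.length_dropWhile_le _ _) hr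
      by_cases hb : c = 'b'
      · subst hb
        by_cases hds : r.takeWhile PySem.Chars.isdigit = []
        · simp only [aRec, bRec, if_pos rfl, hds, if_pos rfl]
          simp [sync_eq fuel r hr prev]
        · have hbt : betToks (fuel + 1) ('b' :: r) =
              some ((PySem.Int.ofChars? (r.takeWhile PySem.Chars.isdigit)).getD 0) ::
                betToks fuel (r.dropWhile PySem.Chars.isdigit) := by
            simp [betToks, hds]
          rw [hbt] at hbad
          simp only [badTok] at hbad
          simp only [aRec, bRec, if_pos rfl, hds, if_neg hds]
          by_cases hgt : (PySem.Int.ofChars? (r.takeWhile PySem.Chars.isdigit)).getD 0 > 3 * prev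
          · rw [if_pos hgt] at hbad
            have h300 : (PySem.Int.ofChars? (r.takeWhile PySem.Chars.isdigit)).getD 0 > 300 := by omega
            simp only [hgt, h300]
            simp [ih _ hdw _ (by omega) hbad]
          · rw [if_neg hgt] at hbad
            have h300 : ¬ ((PySem.Int.ofChars? (r.takeWhile PySem.Chars.isdigit)).getD 0 > 300) := by
              simp at hbad; omega
            simp only [hgt, h300]
            simp [sync_eq fuel _ hdw]
      · have hbt : betToks (fuel + 1) (c :: r) = betToks fuel r := by simp [betToks, hb]
        rw [hbt] at hbad
        simp only [aRec, bRec, if_neg hb]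
        simp [ih r hr prev hprev hbad]

-- the D_ region, read off the 'b'-split of a street, is exactly badTok on its token list
lemma dBadParts_eq : ∀ (fuel : Nat) (s : List Char), s.length ≤ fuel → ∀ prev : Int,
    dBadParts prev ((splitB 'b' s).tail) = badTok prev (betToks fuel s) := by
  intro fuel
  induction fuel with
  | zero =>
    intro s h prev
    have : s = [] := by cases s <;> simp_all
    subst this; rfl
  | succ fuel ih =>
    intro s h prev
    cases s with
    | nil => rfl
    | cons c r =>
      have hr : r.length ≤ fuel := by simpa using Nat.le_of_succ_le_succ h
      have hdwl : (r.dropWhile PySem.Chars.isdigit).length ≤ fuel :=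
        le_trans (List.length_dropWhile_le _ _) hr
      obtain ⟨p0, parts, hsp, htw, hdp⟩ := splitB_digit r
      by_cases hb : c = 'b'
      · subst hb
        have hsc : splitB 'b' ('b' :: r) = [] :: splitB 'b' r := by simp [splitB]
        rw [hsc]
        simp only [List.tail_cons, hsp]
        simp only [dBadParts, ← htw]
        by_cases hds : r.takeWhile PySem.Chars.isdigit = []
        · simp [betToks, hds, badTok]
        · have hbt : betToks (fuel + 1) ('b' :: r) =
              some ((PySem.Int.ofChars? (r.takeWhile PySem.Chars.isdigit)).getD 0) ::
                betToks fuel (r.dropWhile PySem.Chars.isdigit) := by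
            simp [betToks, hds]
          rw [hbt]
          simp only [badTok, if_neg hds]
          by_cases hgt : (PySem.Int.ofChars? (r.takeWhile PySem.Chars.isdigit)).getD 0 > 3 * prev
          · rw [if_pos hgt, if_pos hgt]
            have := ih (r.dropWhile PySem.Chars.isdigit) hdwl
              ((PySem.Int.ofChars? (r.takeWhile PySem.Chars.isdigit)).getD 0)
            rw [hdp] at this
            simpa using this
          · rw [if_neg hgt, if_neg hgt]
      · have hsc : splitB 'b' (c :: r) = (c :: p0) :: parts := by simp [splitB, hb, hsp]
        have hbt : betToks (fuel + 1) (c :: r) = betToks fuel r := by simp [betToks, hb]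
        rw [hsc, hbt, List.tail_cons, ← ih r hr prev, hsp, List.tail_cons]

lemma street_eq (s : List Char) (h : dBadParts 100 ((PySem.Chars.splitOn s ['b']).tail) = false) :
    aLoop s.length s [] 100 = bStreet s := by
  rw [splitOn_eq_splitB, dBadParts_eq s.length s le_rfl 100] at h
  rw [aLoop_eq s.length s le_rfl, bStreet_eq_bRec]
  simpa using run_eq s.length s le_rfl 100 (by omega) h

-- ---------- tightness: inside D_ the two programs really differ ----------
lemma len_ab : ∀ (fuel : Nat) (s : List Char) (seen : Bool) (prev pv : Int),
    (aRec fuel s seen prev).length = (bRec fuel s pv).length := by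
  intro fuel
  induction fuel with
  | zero => intro s seen prev pv; cases s <;> rfl
  | succ fuel ih =>
    intro s seen prev pv
    cases s with
    | nil => rfl
    | cons c r =>
      by_cases hb : c = 'b'
      · simp only [aRec, bRec, if_pos hb]
        by_cases hds : r.takeWhile PySem.Chars.isdigit = []
        · simp only [hds, if_pos rfl, List.length_cons]
          exact congrArg (· + 1) (ih r true prev pv)
        · simp only [hds, if_neg hds, List.length_cons]
          exact congrArg (· + 1) (ih _ _ _ _)
      · simp only [aRec, bRec, if_neg hb, List.length_cons]
        exact congrArg (· + 1) (ih r seen prev pv)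

lemma diverge : ∀ (fuel : Nat) (s : List Char), s.length ≤ fuel → ∀ prev : Int, 100 ≤ prev →
    badTok prev (betToks fuel s) = true → aRec fuel s false prev ≠ bRec fuel s prev := by
  intro fuel
  induction fuel with
  | zero =>
    intro s h prev _ hbad
    have : s = [] := by cases s <;> simp_all
    subst this; simp [betToks, badTok] at hbad
  | succ fuel ih =>
    intro s h prev hprev hbad
    cases s with
    | nil => simp [betToks, badTok] at hbad
    | cons c r =>
      have hr : r.length ≤ fuel := by simpa using Nat.le_of_succ_le_succ h
      have hdw : (r.dropWhile PySem.Chars.isdigit).length ≤ fuel :=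
        le_trans (List.length_dropWhile_le _ _) hr
      by_cases hb : c = 'b'
      · subst hb
        by_cases hds : r.takeWhile PySem.Chars.isdigit = []
        · have : betToks (fuel + 1) ('b' :: r) = none :: betToks fuel r := by simp [betToks, hds]
          rw [this] at hbad
          simp [badTok] at hbad
        · have hbt : betToks (fuel + 1) ('b' :: r) =
              some ((PySem.Int.ofChars? (r.takeWhile PySem.Chars.isdigit)).getD 0) ::
                betToks fuel (r.dropWhile PySem.Chars.isdigit) := by
            simp [betToks, hds]
          rw [hbt] at hbad
          simp only [badTok] at hbad
          simp only [aRec, bRec, if_pos rfl, hds, if_neg hds]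
          by_cases hgt : (PySem.Int.ofChars? (r.takeWhile PySem.Chars.isdigit)).getD 0 > 3 * prev
          · rw [if_pos hgt] at hbad
            have h300 : (PySem.Int.ofChars? (r.takeWhile PySem.Chars.isdigit)).getD 0 > 300 := by omega
            simp only [hgt, h300]
            intro heq
            exact ih _ hdw _ (by omega) hbad (by simpa using heq)
          · rw [if_neg hgt] at hbad
            have h300 : (PySem.Int.ofChars? (r.takeWhile PySem.Chars.isdigit)).getD 0 > 300 := by
              simp at hbad; omega
            simp only [hgt, h300]
            simp
      · have hbt : betToks (fuel + 1) (c :: r) = betToks fuel r := by simp [betToks, hb]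
        rw [hbt] at hbad
        simp only [aRec, bRec, if_neg hb]
        intro heq
        exact ih r hr prev hprev hbad (by simpa using heq)

lemma street_neq (s : List Char) (h : dBadParts 100 ((PySem.Chars.splitOn s ['b']).tail) = true) :
    aLoop s.length s [] 100 ≠ bStreet s := by
  rw [splitOn_eq_splitB, dBadParts_eq s.length s le_rfl 100] at h
  rw [aLoop_eq s.length s le_rfl, bStreet_eq_bRec]
  simpa using diverge s.length s le_rfl 100 (by omega) h

lemma street_len (s : List Char) : (aLoop s.length s [] 100).length = (bStreet s).length := by
  rw [aLoop_eq s.length s le_rfl, bStreet_eq_bRec]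
  simpa using len_ab s.length s false 100 100

-- '/'-joined lists with componentwise equal lengths are equal only componentwise
lemma join_inj : ∀ (ps qs : List (List Char)), ps.length = qs.length →
    (∀ i (h1 : i < ps.length) (h2 : i < qs.length), ps[i].length = qs[i].length) →
    PySem.Chars.join ['/'] ps = PySem.Chars.join ['/'] qs → ps = qs := by
  intro ps
  induction ps with
  | nil => intro qs hl _ _; cases qs with | nil => rfl | cons q qs => simp at hl
  | cons p ps ih =>
    intro qs hl hcl hj
    cases qs with
    | nil => simp at hl
    | cons q qs =>
      have hpq : p.length = q.length := by simpa using hcl 0 (by simp) (by simp)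
      cases ps with
      | nil =>
        cases qs with
        | nil => simpa [PySem.Chars.join_singleton] using hj
        | cons q2 qs2 => simp at hl
      | cons p2 ps2 =>
        cases qs with
        | nil => simp at hl
        | cons q2 qs2 =>
          rw [PySem.Chars.join_cons_cons, PySem.Chars.join_cons_cons] at hj
          rw [List.append_assoc, List.append_assoc] at hj
          obtain ⟨hpq', hrest⟩ := List.append_inj hj hpq
          have := ih (q2 :: qs2) (by simpa using hl) ?_ (by simpa using hrest)
          · rw [hpq', this]
          · intro i hi1 hi2
            have := hcl (i + 1) (by simpa using hi1) (by simpa using hi2)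
            simpa using this

-- ===== VERDICT (by name: the statement is the Claim_ definition above) =====
theorem parse_action_simplified_spec : Claim_unchanged_parse_action_simplified := by
  intro action _ hD
  unfold parse_action_simplified parse_action_simplified_alt
  by_cases h : action = ""
  · subst h; rfl
  · rw [if_neg h]
    have hall : ∀ s ∈ PySem.Chars.splitOn action.toList ['/'], dBadParts 100 ((PySem.Chars.splitOn s ['b']).tail) = false := by
      intro s hs
      by_contra hbad
      exact hD ⟨s, hs, by simpa using hbad⟩
    have : (PySem.Chars.splitOn action.toList ['/']).map (fun street => aLoop street.length street [] 100) =
        (PySem.Chars.splitOn action.toList ['/']).map bStreet := by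
      apply List.map_congr_left
      intro s hs
      exact street_eq s (hall s hs)
    simp only [this]

theorem parse_action_simplified_changed : Claim_changed_parse_action_simplified := by
  unfold Claim_changed_parse_action_simplified; decide

theorem parse_action_simplified_tight : Claim_exact_parse_action_simplified := by
  intro action _ hD heq
  obtain ⟨s, hs, hbad⟩ := hD
  have hne : action ≠ "" := by
    intro h0
    subst h0
    rw [show ("" : String).toList = [] from rfl, splitOn_eq_splitB] at hs
    simp [splitB] at hs
    subst hs
    rw [splitOn_eq_splitB] at hbad
    simp [splitB, dBadParts] at hbad
  unfold parse_action_simplified parse_action_simplified_alt at heq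
  rw [if_neg hne] at heq
  have hjoin := congrArg String.toList heq
  simp only [String.toList_ofList] at hjoin
  have hmap := join_inj _ _ (by simp) ?_ hjoin
  · have hcomp : aLoop s.length s [] 100 = bStreet s :=
      List.map_inj_left.mp hmap s hs
    exact street_neq s hbad hcomp
  · intro i h1 h2
    simp only [List.getElem_map]
    exact street_len _
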